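-- pv_equiv track=rewrite | github.com/tehnix53/Fluorography-Cardio-Index-Analysis | cardio_torax_index.py | count_zero_board_reverse
-- ===== SOURCE A (Python) =====
-- def count_zero_board_reverse(matrix):
--     n = []
--     m = 0
--     for element in matrix:
--         m = 0
--         for i in reversed(element):
--             if i == 0:
--                 m += 1
--             else:
--                 n += [m]
--                 m = 0
--                 break
--     return min(n)
-- ===== SOURCE B (Python) =====
-- def count_zero_board_reverse(matrix):
--     n = []
--     for row in matrix:
--         last = -1
--         for i in range(len(row)):
--             if row[i] != 0:
--                 last = i
--         if last != -1:
--             n.append(len(row) - 1 - last)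
--     return min(n)
-- ===== Notes on version B (the rewrite author's own statement) =====
-- stated objective: alternative
-- what changed: replaces the backward reversed() scan-and-break per row with a forward scan that records the last nonzero index and derives the trailing-zero count as len(row)-1-last
import Mathlib
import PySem

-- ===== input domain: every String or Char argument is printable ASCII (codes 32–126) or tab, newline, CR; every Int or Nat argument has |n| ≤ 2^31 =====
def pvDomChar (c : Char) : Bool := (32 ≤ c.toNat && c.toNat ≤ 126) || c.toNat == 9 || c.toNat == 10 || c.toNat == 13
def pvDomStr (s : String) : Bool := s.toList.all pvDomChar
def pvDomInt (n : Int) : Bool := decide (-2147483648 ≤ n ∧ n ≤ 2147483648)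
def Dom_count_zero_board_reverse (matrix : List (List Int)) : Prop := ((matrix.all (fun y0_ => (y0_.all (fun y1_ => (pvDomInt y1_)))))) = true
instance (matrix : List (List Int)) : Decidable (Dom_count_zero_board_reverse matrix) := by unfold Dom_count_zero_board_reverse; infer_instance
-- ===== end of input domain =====

-- B replaces A's backward reversed() scan-and-break per row with a forward scan recording the
-- last nonzero index, deriving the trailing-zero count as len(row)-1-last (alternative, same cost).


-- ===== PORT A =====
-- A's inner loop: walk the reversed row with counter m; first nonzero yields some m (break),
-- exhausting the list yields none (no value appended for this row).
def pvRevLoopA : List Int → Int → Option Int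
  | [], _ => none
  | x :: t, m => if x = 0 then pvRevLoopA t (m + 1) else some m

def count_zero_board_reverse (matrix : List (List Int)) : Int :=
  let n := matrix.foldl (fun n row =>
    match pvRevLoopA row.reverse 0 with
    | some m => n ++ [m]
    | none => n) []
  -- min(n): Python raises ValueError on n = []; Pre_ excludes exactly that, getD 0 is unreachable there
  (PySem.List.min? n (fun y => y)).getD 0

-- ===== PORT B =====
-- B's inner loop: forward scan, last := index of last nonzero (-1 if none)
def pvLastNZ (row : List Int) : Int :=
  row.zipIdx.foldl (fun last p => if p.1 ≠ 0 then (p.2 : Int) else last) (-1)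

def count_zero_board_reverse_alt (matrix : List (List Int)) : Int :=
  let n := matrix.foldl (fun n row =>
    let last := pvLastNZ row
    if last ≠ -1 then n ++ [(row.length : Int) - 1 - last] else n) []
  (PySem.List.min? n (fun y => y)).getD 0

-- ===== PRECONDITION & SPEC =====
-- Pre_ excludes exactly the inputs where min([]) raises ValueError in Python A: no row has a nonzero entry.
def Pre_count_zero_board_reverse (matrix : List (List Int)) : Prop :=
  ∃ row ∈ matrix, ∃ x ∈ row, x ≠ 0
instance (matrix : List (List Int)) : Decidable (Pre_count_zero_board_reverse matrix) := by
  unfold Pre_count_zero_board_reverse; infer_instance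

def pvWitness_count_zero_board_reverse : List (List Int) := [[0, 3, 0, 0], [1]]

def Spec_count_zero_board_reverse (matrix : List (List Int)) (out : Int) : Prop := out = count_zero_board_reverse_alt matrix
instance (matrix : List (List Int)) (out : Int) : Decidable (Spec_count_zero_board_reverse matrix out) := by unfold Spec_count_zero_board_reverse; infer_instance

-- ===== CLAIM (what is proved, stated in full; the proofs are below) =====
def Claim_equal_count_zero_board_reverse : Prop := ∀ (matrix : List (List Int)), Dom_count_zero_board_reverse matrix → Pre_count_zero_board_reverse matrix → Spec_count_zero_board_reverse matrix (count_zero_board_reverse matrix)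

-- ===== LEMMAS AND PROOFS =====

theorem pvRevLoopA_shift (l : List Int) (m : Int) :
    pvRevLoopA l m = (pvRevLoopA l 0).map (fun k => k + m) := by
  induction l generalizing m with
  | nil => simp [pvRevLoopA]
  | cons x t ih =>
    by_cases hx : x = 0
    · simp [pvRevLoopA, hx, ih (m + 1), ih 1, Option.map_map]
      congr 1; funext k; omega
    · simp [pvRevLoopA, hx]

theorem pvLastNZ_append (ys : List Int) (x : Int) :
    pvLastNZ (ys ++ [x]) = if x ≠ 0 then (ys.length : Int) else pvLastNZ ys := by
  simp [pvLastNZ, List.zipIdx_append, List.foldl_append]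

-- the row-level bridge: A's reverse scan-and-break equals B's len-1-lastNonzeroIndex
theorem row_bridge (row : List Int) :
    pvRevLoopA row.reverse 0 =
      if pvLastNZ row = -1 then none
      else some ((row.length : Int) - 1 - pvLastNZ row) := by
  induction row using List.reverseRecOn with
  | nil => simp [pvRevLoopA, pvLastNZ]
  | append_singleton ys x ih =>
    rw [List.reverse_append, pvLastNZ_append]
    by_cases hx : x = 0
    · subst hx
      rw [List.reverse_singleton, List.singleton_append,
        show pvRevLoopA ((0:Int) :: ys.reverse) 0 = pvRevLoopA ys.reverse 1 from by
          simp [pvRevLoopA],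
        pvRevLoopA_shift, ih]
      simp only [ne_eq, not_true_eq_false, if_false]
      by_cases h0 : pvLastNZ ys = -1
      · simp [h0]
      · simp only [h0, if_false, Option.map_some, Option.some.injEq,
          List.length_append, List.length_cons, List.length_nil]
        push_cast
        ring
    · have hlen : ((ys.length : Int) = -1) = False := by
        simp
      simp only [List.reverse_singleton, List.singleton_append, pvRevLoopA,
        ne_eq, hx, not_false_eq_true, if_true, hlen, if_false, List.length_append]
      simp only [List.length_cons, List.length_nil, Option.some.injEq]
      push_cast
      ring

theorem n_lists_eq (matrix : List (List Int)) (acc : List Int) :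
    matrix.foldl (fun n row =>
      match pvRevLoopA row.reverse 0 with
      | some m => n ++ [m]
      | none => n) acc
    = matrix.foldl (fun n row =>
        let last := pvLastNZ row
        if last ≠ -1 then n ++ [(row.length : Int) - 1 - last] else n) acc := by
  induction matrix generalizing acc with
  | nil => rfl
  | cons row t ih =>
    simp only [List.foldl_cons, row_bridge row]
    by_cases h : pvLastNZ row = -1
    · simp [h, ih]
    · simp [h, ih]

-- ===== VERDICT (by name: the statement is the Claim_ definition above) =====
theorem count_zero_board_reverse_spec : Claim_equal_count_zero_board_reverse := by
  intro matrix _ _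
  unfold Spec_count_zero_board_reverse count_zero_board_reverse count_zero_board_reverse_alt
  rw [n_lists_eq]
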